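-- pv_equiv track=rewrite | github.com/Yasaswini30022/url_shortener | url_shortener/url_shortener/shortener/views.py | generate_short_code
-- ===== SOURCE A (Python) =====
-- SHORT_CODE_LENGTH = 6  # Specify the desired length of the short code
--
-- def generate_short_code(number):
--     """
--     Generate a short code of a specific length from a number using Base64 encoding.
--     """
--     base64_chars = "ABCDEFGHIJKLMNOPQRSTUVWXYZabcdefghijklmnopqrstuvwxyz0123456789-_"
--     short_code = ""
--     while number > 0:
--         number, remainder = divmod(number, 64)
--         short_code = base64_chars[remainder] + short_code
--
--     # Truncate or pad the short code to the desired length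
--     if len(short_code) < SHORT_CODE_LENGTH:
--         short_code = short_code.ljust(SHORT_CODE_LENGTH, base64_chars[0])
--     elif len(short_code) > SHORT_CODE_LENGTH:
--         short_code = short_code[:SHORT_CODE_LENGTH]
--
--     return short_code
-- ===== SOURCE B (Python) =====
-- SHORT_CODE_LENGTH = 6
--
-- base64_chars = "ABCDEFGHIJKLMNOPQRSTUVWXYZabcdefghijklmnopqrstuvwxyz0123456789-_"
--
-- def _enc(n):
--     # MSB-first base-64 digit string; '' for n <= 0
--     if n <= 0:
--         return ""
--     return _enc(n // 64) + base64_chars[n % 64]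
--
-- def generate_short_code(number):
--     return (_enc(number) + base64_chars[0] * SHORT_CODE_LENGTH)[:SHORT_CODE_LENGTH]
-- ===== Notes on version B (the rewrite author's own statement) =====
-- stated objective: simpler
-- what changed: Replaces the prepend-in-a-while-loop digit construction plus three-way ljust/truncate branching by a recursive MSB-first base-64 encoder and a single pad-then-slice expression.
import Mathlib
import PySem

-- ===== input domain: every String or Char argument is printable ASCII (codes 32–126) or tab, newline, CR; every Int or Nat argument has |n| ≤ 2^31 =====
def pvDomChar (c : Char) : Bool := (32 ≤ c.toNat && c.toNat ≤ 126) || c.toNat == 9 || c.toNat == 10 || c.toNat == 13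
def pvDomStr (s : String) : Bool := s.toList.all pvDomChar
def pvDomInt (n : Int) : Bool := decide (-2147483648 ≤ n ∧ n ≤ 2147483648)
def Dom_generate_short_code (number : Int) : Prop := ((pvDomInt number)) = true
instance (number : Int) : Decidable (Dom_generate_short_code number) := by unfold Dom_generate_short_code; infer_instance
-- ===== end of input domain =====

-- B replaces the prepend-while-loop + ljust/truncate branching by a recursive MSB-first
-- base-64 encoder and one pad-then-slice expression (objective: simpler).

-- ===== PORT A =====
def pvB64 : List Char := "ABCDEFGHIJKLMNOPQRSTUVWXYZabcdefghijklmnopqrstuvwxyz0123456789-_".toList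

-- the 'while number > 0' loop; remainder is always in [0,64) so the index never raises
def pvLoopA (number : Int) (short_code : List Char) : List Char :=
  if _h : number > 0 then
    pvLoopA (PySem.Int.floordiv number 64)
      (PySem.List.pyGetD pvB64 (PySem.Int.mod number 64) 'A' :: short_code)
  else short_code
termination_by number.toNat
decreasing_by
  rw [PySem.Int.floordiv_eq_ediv_of_pos (by omega)]
  omega

def generate_short_code (number : Int) : String :=
  let sc := pvLoopA number []
  -- ljust(6, 'A') ported by hand as right-padding with 'A' (exact for this pad char)
  if sc.length < 6 then String.ofList (sc ++ List.replicate (6 - sc.length) 'A')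
  else if sc.length > 6 then String.ofList (PySem.List.slice sc none (some 6))
  else String.ofList sc

-- ===== PORT B =====
-- _enc: MSB-first base-64 digits, '' for n ≤ 0
def pvEncB (n : Int) : List Char :=
  if n ≤ 0 then []
  else pvEncB (PySem.Int.floordiv n 64) ++ [PySem.List.pyGetD pvB64 (PySem.Int.mod n 64) 'A']
termination_by n.toNat
decreasing_by
  rw [PySem.Int.floordiv_eq_ediv_of_pos (by omega)]
  omega

def generate_short_code_alt (number : Int) : String :=
  String.ofList (PySem.List.slice (pvEncB number ++ List.replicate 6 'A') none (some 6))

-- ===== PRECONDITION & SPEC =====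
def Spec_generate_short_code (number : Int) (out : String) : Prop := out = generate_short_code_alt number
instance (number : Int) (out : String) : Decidable (Spec_generate_short_code number out) := by unfold Spec_generate_short_code; infer_instance

-- ===== CLAIM (what is proved, stated in full; the proofs are below) =====
def Claim_equal_generate_short_code : Prop := ∀ (number : Int), Dom_generate_short_code number → Spec_generate_short_code number (generate_short_code number)

-- ===== LEMMAS AND PROOFS =====

-- the while loop prepending digits computes the MSB-first digit list followed by the accumulator
theorem pvLoopA_eq_encB (n : Int) (sc : List Char) : pvLoopA n sc = pvEncB n ++ sc := by
  by_cases h : n > 0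
  · rw [pvLoopA, pvEncB]
    simp only [h, dite_true, if_neg (by omega : ¬ n ≤ 0)]
    rw [pvLoopA_eq_encB (PySem.Int.floordiv n 64)]
    simp
  · rw [pvLoopA, pvEncB]
    simp [h, (by omega : n ≤ 0)]
termination_by n.toNat
decreasing_by
  rw [PySem.Int.floordiv_eq_ediv_of_pos (by omega)]
  omega

-- fixed-length shaping: ljust/truncate on s equals (s ++ 'A'*6)[:6], for every s
theorem shape_eq (s : List Char) :
    (if s.length < 6 then s ++ List.replicate (6 - s.length) 'A'
     else if s.length > 6 then PySem.List.slice s none (some 6)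
     else s)
    = PySem.List.slice (s ++ List.replicate 6 'A') none (some 6) := by
  simp only [show ∀ (xs : List Char), PySem.List.slice xs none (some 6) = xs.take 6 from
    fun xs => by rw [PySem.List.slice_to xs (by norm_num)]; congr 1]
  rw [List.take_append, List.take_replicate]
  split_ifs with h1 h2
  · rw [List.take_of_length_le (by omega)]
    congr 2
    omega
  · simp
    omega
  · rw [List.take_of_length_le (by omega)]
    simp
    omega

-- ===== VERDICT (by name: the statement is the Claim_ definition above) =====
theorem generate_short_code_spec : Claim_equal_generate_short_code := by
  intro number _
  unfold Spec_generate_short_code generate_short_code generate_short_code_alt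
  simp only [pvLoopA_eq_encB, List.append_nil]
  rw [← shape_eq]
  split_ifs <;> rfl
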